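-- pv_equiv track=rewrite | github.com/thedadams/vim-codespell | plugin/codespell.py | filter_multi_occurrence
-- ===== SOURCE A (Python) =====
-- from collections import defaultdict
--
-- def filter_multi_occurrence(words):
--     counts = defaultdict(lambda: 0)
--     for word in words:
--         counts[word] += 1
--     filtered = []
--     for word, count in counts.items():
--         # TODO: make this configurable
--         if count < 5:
--             filtered.append(word)
--     return filtered
-- ===== SOURCE B (Python) =====
-- def filter_multi_occurrence(words):
--     filtered = []
--     rest = list(words)
--     while rest:
--         word = rest[0]
--         remaining = [w for w in rest[1:] if w != word]
--         # occurrences of word in rest = len(rest) - len(remaining)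
--         if len(rest) - len(remaining) < 5:
--             filtered.append(word)
--         rest = remaining
--     return filtered
-- ===== Notes on version B (the rewrite author's own statement) =====
-- stated objective: alternative
-- what changed: Replaces A's frequency-table pass (defaultdict counting + items scan) with a worklist-shrinking loop: repeatedly take the first word of the remaining list, delete all its occurrences, and obtain its count as the length drop of the list; no counter and no seen set are kept.
import Mathlib
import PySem

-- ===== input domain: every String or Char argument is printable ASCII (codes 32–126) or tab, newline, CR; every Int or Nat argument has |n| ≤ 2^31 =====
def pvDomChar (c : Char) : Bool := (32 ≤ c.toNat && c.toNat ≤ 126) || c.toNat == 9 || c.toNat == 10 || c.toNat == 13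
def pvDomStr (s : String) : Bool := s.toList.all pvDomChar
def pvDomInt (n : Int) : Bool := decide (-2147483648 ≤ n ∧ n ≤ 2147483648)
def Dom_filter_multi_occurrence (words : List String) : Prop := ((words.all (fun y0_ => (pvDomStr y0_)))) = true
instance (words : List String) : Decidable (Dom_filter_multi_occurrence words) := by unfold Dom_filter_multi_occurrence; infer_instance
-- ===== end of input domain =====

-- B replaces A's frequency table with a worklist-shrinking loop (count = length drop
-- when all occurrences of the head word are deleted): alternative algorithm, not faster.


-- ===== PORT A =====
def filter_multi_occurrence (words : List String) : List String :=
  ((words.foldl (fun d w => d.modify w 0 (· + 1)) (PySem.Dict.empty : PySem.Dict String Int)).items).foldl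
    (fun acc p => if p.2 < 5 then acc ++ [p.1] else acc) []

-- ===== PORT B =====
-- the while loop of Source B: state = (rest, filtered); rest shrinks strictly each step
def fmoLoop (rest : List String) (filtered : List String) : List String :=
  match rest with
  | [] => filtered
  | word :: t =>
    let remaining := t.filter (fun w => !(w == word))
    fmoLoop remaining
      (if ((word :: t).length : Int) - (remaining.length : Int) < 5 then filtered ++ [word] else filtered)
termination_by rest.length
decreasing_by
  simp only [List.length_cons, List.length_unattach]
  calc (List.filter _ t.attach).length ≤ t.attach.length := List.length_filter_le _ _
    _ = t.length := List.length_attach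
    _ < t.length + 1 := Nat.lt_succ_self _

def filter_multi_occurrence_alt (words : List String) : List String :=
  fmoLoop words []

-- ===== PRECONDITION & SPEC =====
def Spec_filter_multi_occurrence (words : List String) (out : List String) : Prop := out = filter_multi_occurrence_alt words
instance (words : List String) (out : List String) : Decidable (Spec_filter_multi_occurrence words out) := by unfold Spec_filter_multi_occurrence; infer_instance

-- ===== CLAIM (what is proved, stated in full; the proofs are below) =====
def Claim_equal_filter_multi_occurrence : Prop := ∀ (words : List String), Dom_filter_multi_occurrence words → Spec_filter_multi_occurrence words (filter_multi_occurrence words)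

-- ===== LEMMAS AND PROOFS =====

-- A's second loop as filter+map
theorem pv_foldl_pairs (l : List (String × Int)) (acc : List String) :
    l.foldl (fun acc p => if p.2 < 5 then acc ++ [p.1] else acc) acc
    = acc ++ (l.filter (fun p => decide (p.2 < 5))).map Prod.fst := by
  induction l generalizing acc with
  | nil => simp
  | cons p l ih =>
    simp only [List.foldl_cons, List.filter_cons]
    by_cases h : p.2 < 5 <;> simp [h, ih]

-- Set.ofList commutes with filter
theorem pv_ofList_filter (p : String → Bool) (l : List String) :
    PySem.Set.ofList (l.filter p) = (PySem.Set.ofList l).filter p := by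
  induction l with
  | nil => simp [PySem.Set.ofList_nil]
  | cons x l ih =>
    have hd : ∀ (s : List String) (x : String),
        PySem.Set.discard s x = s.filter (fun y => !(y == x)) := fun _ _ => rfl
    rw [List.filter_cons]
    by_cases hx : p x = true
    · rw [if_pos hx, PySem.Set.ofList_cons, PySem.Set.ofList_cons, ih, hd, hd,
        List.filter_filter, List.filter_cons, if_pos hx, List.filter_filter]
      apply congrArg (x :: ·); apply List.filter_congr; intro y _; simp [Bool.and_comm]
    · have hx' : p x = false := by simpa using hx
      rw [if_neg (by simp [hx']), ih, PySem.Set.ofList_cons, List.filter_cons, if_neg (by simp [hx']),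
        hd, List.filter_filter]
      apply List.filter_congr
      intro y _
      by_cases hy : y = x
      · subst hy; simp [hx']
      · simp [hy]

-- count of a surviving word is unchanged by deleting the head word's occurrences
theorem pv_count_filter_ne (t : List String) (w x : String) (hx : x ≠ w) :
    (t.filter (fun y => !(y == w))).count x = t.count x := by
  rw [List.count_filter]
  simp [hx]

-- B's loop computes filter over the deduped remaining list, with counts in that list
theorem pv_fmoLoop_eq (l acc : List String) :
    fmoLoop l acc
    = acc ++ (PySem.Set.ofList l).filter (fun x => decide ((l.count x : Int) < 5)) := by
  induction hn : l.length using Nat.strong_induction_on generalizing l acc with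
  | _ n ih =>
  cases l with
  | nil => rw [fmoLoop.eq_def]; simp [PySem.Set.ofList_nil]
  | cons w t =>
    have hrem : (t.filter (fun y => !(y == w))).length < n := by
      subst hn
      simp only [List.length_cons]
      exact Nat.lt_succ_of_le (List.length_filter_le _ _)
    have hstep : fmoLoop (w :: t) acc = fmoLoop (t.filter (fun y => !(y == w)))
        (if ((w :: t).length : Int) - ((t.filter (fun y => !(y == w))).length : Int) < 5
         then acc ++ [w] else acc) := by rw [fmoLoop.eq_def]
    rw [hstep, ih _ hrem _ _ rfl]
    -- rewrite the recursive filter to counts in (w :: t)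
    have hcounts :
        (PySem.Set.ofList (t.filter (fun y => !(y == w)))).filter
            (fun x => decide (((t.filter (fun y => !(y == w))).count x : Int) < 5))
        = (PySem.Set.discard (PySem.Set.ofList t) w).filter
            (fun x => decide (((w :: t).count x : Int) < 5)) := by
      rw [pv_ofList_filter]
      have hd : PySem.Set.discard (PySem.Set.ofList t) w
          = (PySem.Set.ofList t).filter (fun y => !(y == w)) := rfl
      rw [hd]
      apply List.filter_congr
      intro x hx
      have hxw : x ≠ w := by
        rcases List.mem_filter.mp hx with ⟨_, hxw⟩
        simpa using hxw
      rw [pv_count_filter_ne t w x hxw]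
      have hwx : w ≠ x := Ne.symm hxw
      simp [hwx]
    -- the length-drop test is the count of w in (w :: t)
    have hlen : (t.filter (fun y => !(y == w))).length + t.count w = t.length := by
      have h1 := List.length_eq_countP_add_countP (p := fun y => (y == w)) (l := t)
      simp only [decide_not, Bool.decide_eq_true] at h1
      have hc : t.count w = t.countP (fun y => (y == w)) := by
        simp [List.count, BEq.comm]
      have h2 : t.countP (fun y => !(y == w)) = (t.filter (fun y => !(y == w))).length :=
        List.countP_eq_length_filter ..
      omega
    have htest : (((w :: t).length : Int) - ((t.filter (fun y => !(y == w))).length : Int) < 5)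
        ↔ (((w :: t).count w : Int) < 5) := by
      rw [List.count_cons_self]
      simp only [List.length_cons]
      omega
    rw [PySem.Set.ofList_cons, List.filter_cons]
    by_cases hk : (((w :: t).length : Int) - ((t.filter (fun y => !(y == w))).length : Int) < 5)
    · rw [if_pos hk, if_pos (by simpa using htest.mp hk), hcounts]
      simp
    · rw [if_neg hk, if_neg (by simpa using fun h => hk (htest.mpr h)), hcounts]

-- ===== VERDICT (by name: the statement is the Claim_ definition above) =====
theorem filter_multi_occurrence_spec : Claim_equal_filter_multi_occurrence := by
  intro words _
  unfold Spec_filter_multi_occurrence filter_multi_occurrence filter_multi_occurrence_alt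
  rw [pv_fmoLoop_eq, ← PySem.Dict.counter_eq_foldl, PySem.Dict.items_counter, pv_foldl_pairs]
  simp [List.filter_map, Function.comp_def, List.map_map]
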